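-- pv_equiv track=rewrite | github.com/Greg-Vincent0711/Lapis | src/lapis/api/router.py | pathPatternsMatch
-- ===== SOURCE A (Python) =====
-- def pathPatternsMatch(routePattern: str, specificPath: str) -> bool:
--     route_segments = routePattern.split("/")
--     specific_path_segments = specificPath.split("/")
--
--     # number of segments between general route like /users and a specific route like "/users/123/posts" must match
--     # Example: "/users" has 2 parts, "/users/123/posts" has 4 parts
--     if len(route_segments) != len(specific_path_segments):
--         return False
--
--     # Compare each segment of the pattern with the corresponding path segment
--     for route_segment, specific_path_segment in zip(route_segments, specific_path_segments):
--         # If pattern segment is a wildcard (like {id} or {name}), it matches anything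
--         if route_segment.startswith("{") and route_segment.endswith("}"):
--             continue  # Wildcard matches anything
--
--         # If it's not a wildcard, the segments must match exactly
--         # Example: "users" must equal "users"
--         if route_segment != specific_path_segment:
--             return False
--     return True
-- ===== SOURCE B (Python) =====
-- def pathPatternsMatch(routePattern: str, specificPath: str) -> bool:
--     # Recursive segment-at-a-time matcher using str.partition: no split lists,
--     # no upfront length comparison -- segment-count mismatch surfaces when one
--     # side runs out of '/' separators before the other.
--     route_head, route_sep, route_rest = routePattern.partition("/")
--     path_head, path_sep, path_rest = specificPath.partition("/")
--     if route_sep != path_sep: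
--         return False  # one side has more segments than the other
--     if not (route_head.startswith("{") and route_head.endswith("}")) and route_head != path_head:
--         return False
--     return route_sep == "" or pathPatternsMatch(route_rest, path_rest)
-- ===== Notes on version B (the rewrite author's own statement) =====
-- stated objective: alternative
-- what changed: Replaced split-into-lists + length check + zip loop with a recursive one-segment-at-a-time matcher over str.partition('/'), which never builds the segment lists and detects a segment-count mismatch on the fly.
import Mathlib
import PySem

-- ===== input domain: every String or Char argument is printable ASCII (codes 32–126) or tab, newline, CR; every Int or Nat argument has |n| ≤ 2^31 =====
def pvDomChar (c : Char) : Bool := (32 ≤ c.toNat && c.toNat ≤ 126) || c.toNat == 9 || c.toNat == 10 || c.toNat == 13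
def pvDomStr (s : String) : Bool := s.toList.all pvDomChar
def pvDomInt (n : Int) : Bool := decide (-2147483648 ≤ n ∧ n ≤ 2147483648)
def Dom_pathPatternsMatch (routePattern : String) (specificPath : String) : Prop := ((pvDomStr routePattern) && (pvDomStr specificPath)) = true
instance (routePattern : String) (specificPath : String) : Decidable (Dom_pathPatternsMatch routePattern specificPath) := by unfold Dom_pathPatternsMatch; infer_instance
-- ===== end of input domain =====

-- B replaces A's split-lists + length-check + zip loop by a recursive one-segment-at-a-time
-- matcher over partition('/'); same return value, objective: alternative decomposition.

-- ===== PORT A =====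
-- the zip loop of A: wildcard segment matches anything, otherwise exact equality, early False
def pathPatternsMatchLoopA : List (List Char × List Char) → Bool
  | [] => true
  | (r, p) :: rest =>
    if PySem.Chars.startswith r ['{'] && PySem.Chars.endswith r ['}'] then
      pathPatternsMatchLoopA rest
    else if r ≠ p then false
    else pathPatternsMatchLoopA rest

def pathPatternsMatch (routePattern : String) (specificPath : String) : Bool :=
  let routeSegments := PySem.Chars.splitOn routePattern.toList ['/']
  let specificPathSegments := PySem.Chars.splitOn specificPath.toList ['/']
  if routeSegments.length ≠ specificPathSegments.length then false
  else pathPatternsMatchLoopA (routeSegments.zip specificPathSegments)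

-- ===== PORT B =====
-- B's recursion on char lists; head/sep/rest of partition('/') are
-- takeWhile (· ≠ '/'), emptiness of dropWhile (· ≠ '/'), and its tail.
def pathPatternsMatchAuxB (r p : List Char) : Bool :=
  let routeHead := r.takeWhile (· ≠ '/')
  let routeRest := r.dropWhile (· ≠ '/')
  let pathHead := p.takeWhile (· ≠ '/')
  let pathRest := p.dropWhile (· ≠ '/')
  if routeRest.isEmpty ≠ pathRest.isEmpty then false
  else if !(PySem.Chars.startswith routeHead ['{'] && PySem.Chars.endswith routeHead ['}'])
          && routeHead ≠ pathHead then false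
  else if routeRest.isEmpty then true
  else pathPatternsMatchAuxB routeRest.tail pathRest.tail
termination_by r.length
decreasing_by
  rename_i hne
  have h1 : List.dropWhile (fun x => decide (x ≠ '/')) r ≠ [] := by
    simpa only [List.isEmpty_iff] using hne
  have h2 := List.length_dropWhile_le (fun x => decide (x ≠ '/')) r
  have h3 := List.length_pos_of_ne_nil h1
  simp only [List.length_tail]
  omega

def pathPatternsMatch_alt (routePattern : String) (specificPath : String) : Bool :=
  pathPatternsMatchAuxB routePattern.toList specificPath.toList

-- ===== PRECONDITION & SPEC =====
def Spec_pathPatternsMatch (routePattern : String) (specificPath : String) (out : Bool) : Prop := out = pathPatternsMatch_alt routePattern specificPath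
instance (routePattern : String) (specificPath : String) (out : Bool) : Decidable (Spec_pathPatternsMatch routePattern specificPath out) := by unfold Spec_pathPatternsMatch; infer_instance

-- ===== CLAIM (what is proved, stated in full; the proofs are below) =====
def Claim_equal_pathPatternsMatch : Prop := ∀ (routePattern : String) (specificPath : String), Dom_pathPatternsMatch routePattern specificPath → Spec_pathPatternsMatch routePattern specificPath (pathPatternsMatch routePattern specificPath)

-- ===== LEMMAS AND PROOFS =====

-- reference splitter: what splitting on '/' yields, in the recursion shape of B
def pvSegs (s : List Char) : List (List Char) :=
  let t := s.dropWhile (· ≠ '/')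
  if t = [] then [s.takeWhile (· ≠ '/')]
  else s.takeWhile (· ≠ '/') :: pvSegs t.tail
termination_by s.length
decreasing_by
  have h2 : (s.dropWhile (· ≠ '/')).length ≤ s.length := List.length_dropWhile_le _ _
  have h3 : 0 < (s.dropWhile (· ≠ '/')).length := List.length_pos_of_ne_nil (by assumption)
  simp only [List.length_tail]; omega

theorem pvSegs_ne_nil (s : List Char) : pvSegs s ≠ [] := by
  rw [pvSegs]; split <;> simp

theorem go_zero (cur : List Char) (acc : List (List Char)) :
    PySem.Chars.splitOn.go ['/'] 0 [] cur acc = acc.reverse ++ [cur.reverse] := by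
  simp [PySem.Chars.splitOn.go]

theorem go_nil (n : Nat) (cur : List Char) (acc : List (List Char)) :
    PySem.Chars.splitOn.go ['/'] (n+1) [] cur acc = acc.reverse ++ [cur.reverse] := by
  simp [PySem.Chars.splitOn.go]

theorem go_cons (n : Nat) (c : Char) (rest cur : List Char) (acc : List (List Char))
    (hc : c ≠ '/') :
    PySem.Chars.splitOn.go ['/'] (n+1) (c :: rest) cur acc
      = PySem.Chars.splitOn.go ['/'] n rest (c :: cur) acc := by
  rw [PySem.Chars.splitOn.go]
  simp only [List.isPrefixOf]
  simp
  exact fun h => absurd h.symm hc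

theorem go_cons_slash (n : Nat) (rest cur : List Char) (acc : List (List Char)) :
    PySem.Chars.splitOn.go ['/'] (n+1) ('/' :: rest) cur acc
      = PySem.Chars.splitOn.go ['/'] n rest [] (cur.reverse :: acc) := by
  rw [PySem.Chars.splitOn.go]
  simp [List.isPrefixOf]

theorem pvSegs_nil : pvSegs [] = [[]] := by
  rw [pvSegs]; simp

theorem dropWhile_cons_ne (c : Char) (t : List Char) (hc : c ≠ '/') :
    List.dropWhile (fun x => decide (x ≠ '/')) (c :: t)
      = List.dropWhile (fun x => decide (x ≠ '/')) t := by
  simp [List.dropWhile_cons, hc]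

theorem takeWhile_cons_ne (c : Char) (t : List Char) (hc : c ≠ '/') :
    List.takeWhile (fun x => decide (x ≠ '/')) (c :: t)
      = c :: List.takeWhile (fun x => decide (x ≠ '/')) t := by
  simp [List.takeWhile_cons, hc]

theorem dropWhile_cons_slash (t : List Char) :
    List.dropWhile (fun x => decide (x ≠ '/')) ('/' :: t) = '/' :: t := by
  simp [List.dropWhile_cons]

theorem takeWhile_cons_slash (t : List Char) :
    List.takeWhile (fun x => decide (x ≠ '/')) ('/' :: t) = [] := by
  simp [List.takeWhile_cons]

theorem pvSegs_cons_slash (t : List Char) : pvSegs ('/' :: t) = [] :: pvSegs t := by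
  rw [pvSegs, dropWhile_cons_slash, takeWhile_cons_slash]
  rw [if_neg (by simp)]
  simp

theorem pvSegs_of_no_slash (s : List Char)
    (h : List.dropWhile (fun x => decide (x ≠ '/')) s = []) :
    pvSegs s = [List.takeWhile (fun x => decide (x ≠ '/')) s] := by
  rw [pvSegs, if_pos h]

theorem pvSegs_of_slash (s : List Char)
    (h : List.dropWhile (fun x => decide (x ≠ '/')) s ≠ []) :
    pvSegs s = List.takeWhile (fun x => decide (x ≠ '/')) s
        :: pvSegs (List.dropWhile (fun x => decide (x ≠ '/')) s).tail := by
  rw [pvSegs, if_neg h]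

theorem pvSegs_cons (c : Char) (t : List Char) (hc : c ≠ '/') :
    pvSegs (c :: t) = (pvSegs t).modifyHead (c :: ·) := by
  conv_rhs => rw [pvSegs]
  rw [pvSegs, dropWhile_cons_ne c t hc, takeWhile_cons_ne c t hc]
  by_cases ht : List.dropWhile (fun x => decide (x ≠ '/')) t = []
  · rw [if_pos ht, if_pos ht]; simp
  · rw [if_neg ht, if_neg ht]; simp

theorem go_slash (fuel : Nat) : ∀ (l cur : List Char) (acc : List (List Char)),
    l.length ≤ fuel →
    PySem.Chars.splitOn.go ['/'] fuel l cur acc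
      = acc.reverse ++ (pvSegs l).modifyHead (cur.reverse ++ ·) := by
  induction fuel with
  | zero =>
    intro l cur acc h
    have hl : l = [] := by cases l <;> simp_all
    subst hl
    rw [go_zero, pvSegs_nil]
    simp
  | succ n ih =>
    intro l cur acc h
    match l with
    | [] => rw [go_nil, pvSegs_nil]; simp
    | c :: rest =>
      by_cases hc : c = '/'
      · subst hc
        rw [go_cons_slash, ih rest [] (cur.reverse :: acc) (by simp at h; omega),
          pvSegs_cons_slash]
        obtain ⟨a, as, ha⟩ := List.exists_cons_of_ne_nil (pvSegs_ne_nil rest)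
        simp [ha]
      · rw [go_cons n c rest cur acc hc, ih rest (c :: cur) acc (by simp at h; omega),
          pvSegs_cons c rest hc]
        obtain ⟨a, as, ha⟩ := List.exists_cons_of_ne_nil (pvSegs_ne_nil rest)
        simp [ha]

theorem splitOn_slash (s : List Char) : PySem.Chars.splitOn s ['/'] = pvSegs s := by
  unfold PySem.Chars.splitOn
  rw [go_slash (s.length + 1) s [] [] (by omega)]
  obtain ⟨a, as, ha⟩ := List.exists_cons_of_ne_nil (pvSegs_ne_nil s)
  simp [ha]

theorem isEmpty_eq_decide (l : List Char) : l.isEmpty = decide (l = []) := by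
  cases l <;> simp

theorem not_all_ne_slash (l : List Char)
    (h : ¬ List.dropWhile (fun x => decide (x ≠ '/')) l = []) :
    ¬ (∀ x ∈ l, ¬ x = '/') := by
  intro hall
  exact h (List.dropWhile_eq_nil_iff.mpr (by simpa using hall))

theorem not_all_of_mem (l : List Char) (h : '/' ∈ l) : ¬ (∀ x ∈ l, ¬ x = '/') :=
  fun hall => hall _ h rfl

theorem aux_eq (n : Nat) : ∀ (r p : List Char), r.length ≤ n →
    pathPatternsMatchAuxB r p
      = (if (pvSegs r).length ≠ (pvSegs p).length then false
         else pathPatternsMatchLoopA ((pvSegs r).zip (pvSegs p))) := by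
  induction n with
  | zero =>
    intro r p h
    have hr : r = [] := by cases r <;> simp_all
    subst hr
    rw [pathPatternsMatchAuxB]
    by_cases hp : List.dropWhile (fun x => decide (x ≠ '/')) p = []
    · rw [pvSegs_of_no_slash [] (by simp), pvSegs_of_no_slash p hp]
      simp_all [pathPatternsMatchLoopA, isEmpty_eq_decide, List.dropWhile_eq_nil_iff,
        pvSegs_ne_nil]
    · have hpm := not_all_ne_slash p hp
      rw [pvSegs_of_no_slash [] (by simp), pvSegs_of_slash p hp]
      simp_all [pathPatternsMatchLoopA, isEmpty_eq_decide, List.dropWhile_eq_nil_iff,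
        pvSegs_ne_nil]
  | succ n ih =>
    intro r p h
    rw [pathPatternsMatchAuxB]
    by_cases hr : List.dropWhile (fun x => decide (x ≠ '/')) r = [] <;>
      by_cases hp : List.dropWhile (fun x => decide (x ≠ '/')) p = []
    · rw [pvSegs_of_no_slash r hr, pvSegs_of_no_slash p hp]
      simp_all [pathPatternsMatchLoopA, isEmpty_eq_decide, List.dropWhile_eq_nil_iff,
        pvSegs_ne_nil]
    · have hpm := not_all_ne_slash p hp
      rw [pvSegs_of_no_slash r hr, pvSegs_of_slash p hp]
      simp_all [pathPatternsMatchLoopA, isEmpty_eq_decide, List.dropWhile_eq_nil_iff,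
        pvSegs_ne_nil]
    · have hrm := not_all_ne_slash r hr
      rw [pvSegs_of_slash r hr, pvSegs_of_no_slash p hp]
      simp_all [pathPatternsMatchLoopA, isEmpty_eq_decide, List.dropWhile_eq_nil_iff,
        pvSegs_ne_nil]
    · have hrm := not_all_ne_slash r hr
      have hpm := not_all_ne_slash p hp
      rw [pvSegs_of_slash r hr, pvSegs_of_slash p hp]
      have hlt : (List.dropWhile (fun x => decide (x ≠ '/')) r).tail.length ≤ n := by
        have h2 := List.length_dropWhile_le (fun x => decide (x ≠ '/')) r
        have h3 := List.length_pos_of_ne_nil hr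
        simp only [List.length_tail]; omega
      rw [ih _ (List.dropWhile (fun x => decide (x ≠ '/')) p).tail hlt]
      have hdr : decide (∀ x ∈ r, ¬ x = '/') = false := decide_eq_false hrm
      have hdp : decide (∀ x ∈ p, ¬ x = '/') = false := decide_eq_false hpm
      by_cases hlen : (pvSegs (List.dropWhile (fun x => decide (x ≠ '/')) r).tail).length
          = (pvSegs (List.dropWhile (fun x => decide (x ≠ '/')) p).tail).length <;>
        by_cases hw : (PySem.Chars.startswith (List.takeWhile (fun x => decide (x ≠ '/')) r) ['{']
            && PySem.Chars.endswith (List.takeWhile (fun x => decide (x ≠ '/')) r) ['}']) = true <;>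
        by_cases he : List.takeWhile (fun x => decide (x ≠ '/')) r
            = List.takeWhile (fun x => decide (x ≠ '/')) p <;>
        simp_all [pathPatternsMatchLoopA, isEmpty_eq_decide, List.dropWhile_eq_nil_iff,
          pvSegs_ne_nil] <;>
        simp [decide_eq_false (not_all_of_mem _ hrm), decide_eq_false (not_all_of_mem _ hpm)]

-- ===== VERDICT (by name: the statement is the Claim_ definition above) =====
theorem pathPatternsMatch_spec : Claim_equal_pathPatternsMatch := by
  intro r p _
  unfold Spec_pathPatternsMatch pathPatternsMatch pathPatternsMatch_alt
  rw [splitOn_slash, splitOn_slash, aux_eq r.toList.length r.toList p.toList le_rfl]
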